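-- pv_equiv track=rewrite | github.com/EchoLLLiu/-offer | 剑指offer/NumberOf1Between1AndN.py | NumberOf1Between1AndN_Solution
-- ===== SOURCE A (Python) =====
-- def NumberOf1Between1AndN_Solution(n):
-- 	count = 0
-- 	tmp = n
-- 	i = 1
-- 	while tmp != 0:
-- 		# a为每位上的数字
-- 		a = tmp % 10
-- 		rem = n % (10**i)
-- 		con = n // (10**i)
-- 		base = 10**(i-1)
-- 		if a > 1:
-- 			count += (con + 1) * base
-- 		elif a < 1:
-- 			count += con * base
-- 		else:
-- 			count += con * base + (rem - 1*base + 1)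
-- 		tmp = tmp // 10
-- 		i += 1
-- 	return count
-- ===== SOURCE B (Python) =====
-- def NumberOf1Between1AndN_Solution(n):
-- 	# Recursive most-significant-digit decomposition: split m = d*p + r (p the
-- 	# largest power of 10 <= m) and count ones in the d full blocks plus the tail.
-- 	def ones(m):
-- 		if m <= 0:
-- 			return 0
-- 		if m < 10:
-- 			return 1
-- 		p = 1
-- 		while p * 10 <= m:
-- 			p *= 10
-- 		d, r = divmod(m, p)
-- 		return d * ones(p - 1) + ones(r) + (r + 1 if d == 1 else p)
-- 	return ones(n)
-- ===== Notes on version B (the rewrite author's own statement) =====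
-- stated objective: alternative
-- what changed: Replaces A's iterative least-significant-digit positional formula (one closed-form term per digit position) with a recursive most-significant-digit divide-and-conquer: split m = d*p + r at the largest power of ten p <= m and combine counts of the d full blocks and the tail; Pre_ excludes negative n, on which A's while loop never terminates (tmp//10 sticks at -1) while B returns 0.
import Mathlib
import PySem

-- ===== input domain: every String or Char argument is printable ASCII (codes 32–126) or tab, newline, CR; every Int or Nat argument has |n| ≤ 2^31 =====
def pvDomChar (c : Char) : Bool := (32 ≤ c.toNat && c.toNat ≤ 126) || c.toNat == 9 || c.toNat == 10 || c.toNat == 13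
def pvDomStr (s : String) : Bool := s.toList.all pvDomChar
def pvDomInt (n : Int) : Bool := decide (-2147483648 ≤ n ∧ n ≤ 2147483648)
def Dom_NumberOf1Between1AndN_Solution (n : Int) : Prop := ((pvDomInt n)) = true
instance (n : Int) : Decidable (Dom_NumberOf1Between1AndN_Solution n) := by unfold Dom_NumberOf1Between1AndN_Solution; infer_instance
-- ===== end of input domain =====

-- B replaces A's iterative least-significant-digit positional formula with a recursive
-- most-significant-digit divide-and-conquer (alternative decomposition, similar cost);
-- return values agree on all n ≥ 0 (A's loop never terminates for n < 0).

-- ===== PORT A =====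
-- the while loop of A; fuel is an upper bound on the iteration count (for tmp ≥ 0 the loop
-- runs at most tmp+1 times since tmp//10 < tmp; for tmp < 0 Python loops forever, which Pre_ excludes)
def aLoop : Nat → Int → Int → Nat → Int → Int
  | 0, _, _, _, count => count
  | fuel + 1, n, tmp, i, count =>
    if tmp = 0 then count
    else
      let a := PySem.Int.mod tmp 10
      let rem := PySem.Int.mod n ((10 : Int) ^ i)
      let con := PySem.Int.floordiv n ((10 : Int) ^ i)
      let base : Int := (10 : Int) ^ (i - 1)
      let count' :=
        if a > 1 then count + (con + 1) * base
        else if a < 1 then count + con * base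
        else count + con * base + (rem - 1 * base + 1)
      aLoop fuel n (PySem.Int.floordiv tmp 10) (i + 1) count'

def NumberOf1Between1AndN_Solution (n : Int) : Int := aLoop (n.natAbs + 1) n n 1 0

-- ===== PORT B =====
-- `while p * 10 <= m: p *= 10`; fuel bounds the iteration count (each step grows p)
def powLoop : Nat → Int → Int → Int
  | 0, _, p => p
  | fuel + 1, m, p => if p * 10 ≤ m then powLoop fuel m (p * 10) else p

-- the recursive `ones`; fuel bounds the recursion depth (both recursive arguments are < m)
def altOnes : Nat → Int → Int
  | 0, _ => 0
  | fuel + 1, m =>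
    if m ≤ 0 then 0
    else if m < 10 then 1
    else
      let p := powLoop m.toNat m 1
      let d := PySem.Int.floordiv m p
      let r := PySem.Int.mod m p
      d * altOnes fuel (p - 1) + altOnes fuel r + (if d = 1 then r + 1 else p)

def NumberOf1Between1AndN_Solution_alt (n : Int) : Int := altOnes (n.toNat + 1) n

-- ===== PRECONDITION & SPEC =====
-- Pre_ excludes exactly the negative inputs: there A's while loop never terminates
-- (tmp // 10 sticks at -1), so A returns on no negative n.
def Pre_NumberOf1Between1AndN_Solution (n : Int) : Prop := 0 ≤ n
instance (n : Int) : Decidable (Pre_NumberOf1Between1AndN_Solution n) := by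
  unfold Pre_NumberOf1Between1AndN_Solution; infer_instance

def pvWitness_NumberOf1Between1AndN_Solution : Int := 1234

def Spec_NumberOf1Between1AndN_Solution (n : Int) (out : Int) : Prop := out = NumberOf1Between1AndN_Solution_alt n
instance (n : Int) (out : Int) : Decidable (Spec_NumberOf1Between1AndN_Solution n out) := by unfold Spec_NumberOf1Between1AndN_Solution; infer_instance

-- ===== CLAIM (what is proved, stated in full; the proofs are below) =====
def Claim_equal_NumberOf1Between1AndN_Solution : Prop := ∀ (n : Int), Dom_NumberOf1Between1AndN_Solution n → Pre_NumberOf1Between1AndN_Solution n → Spec_NumberOf1Between1AndN_Solution n (NumberOf1Between1AndN_Solution n)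

-- ===== LEMMAS AND PROOFS =====

-- number of digits 1 in the decimal expansion of k
def dcount (k : Nat) : Nat :=
  if h : k = 0 then 0 else (if k % 10 = 1 then 1 else 0) + dcount (k / 10)
termination_by k
decreasing_by omega

-- running total of dcount over 0..n : the common specification of both programs
def Cr : Nat → Nat
  | 0 => 0
  | n + 1 => Cr n + dcount (n + 1)

-- closed-form count, at one digit position b (a power of 10), of k ∈ [0,n] with digit 1 there
def posF (n b : Nat) : Nat := n / (b * 10) * b + min b (n % (b * 10) + 1 - b)

-- sum of posF over positions b, b*10, b*100, …
def g (n b : Nat) : Nat :=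
  if hb : b = 0 then 0
  else if h : n < b then 0
  else posF n b + g n (b * 10)
termination_by n + 1 - b
decreasing_by omega

-- count of digits 1 of k at positions b, b*10, …
def dc (k b : Nat) : Nat :=
  if hb : b = 0 then 0
  else if h : k < b then 0
  else (if k / b % 10 = 1 then 1 else 0) + dc k (b * 10)
termination_by k + 1 - b
decreasing_by omega

theorem g_zero (n b : Nat) (h : n < b) : g n b = 0 := by
  rw [g]; split
  · rfl
  · simp [h]

theorem dc_zero (k b : Nat) (h : k < b) : dc k b = 0 := by
  rw [dc]; split
  · rfl
  · simp [h]




theorem posF_succ (N b : Nat) (hb : 0 < b) :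
    posF (N + 1) b = posF N b + (if (N + 1) / b % 10 = 1 then 1 else 0) := by
  obtain ⟨q, r, hqr, hr⟩ : ∃ q r, N = b * 10 * q + r ∧ r < b * 10 :=
    ⟨N / (b * 10), N % (b * 10), (Nat.div_add_mod N (b * 10)).symm, Nat.mod_lt _ (by omega)⟩
  have hdiv : N / (b * 10) = q := by
    rw [hqr, Nat.mul_add_div (by omega), Nat.div_eq_of_lt hr]; omega
  have hmod : N % (b * 10) = r := by
    rw [hqr, Nat.mul_add_mod, Nat.mod_eq_of_lt hr]
  by_cases hcase : r + 1 < b * 10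
  · have e1 : N + 1 = b * 10 * q + (r + 1) := by omega
    have hdiv' : (N + 1) / (b * 10) = q := by
      rw [e1, Nat.mul_add_div (by omega), Nat.div_eq_of_lt hcase]; omega
    have hmod' : (N + 1) % (b * 10) = r + 1 := by
      rw [e1, Nat.mul_add_mod, Nat.mod_eq_of_lt hcase]
    have hdigit : (N + 1) / b = 10 * q + (r + 1) / b := by
      rw [show N + 1 = b * (10 * q) + (r + 1) by rw [← Nat.mul_assoc]; omega,
        Nat.mul_add_div hb]
    have hlt : (r + 1) / b < 10 := (Nat.div_lt_iff_lt_mul hb).mpr (by omega)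
    have hdm : (N + 1) / b % 10 = (r + 1) / b := by
      rw [hdigit, Nat.add_comm, Nat.add_mul_mod_self_left, Nat.mod_eq_of_lt hlt]
    have hiff : ((r + 1) / b = 1) ↔ (b ≤ r + 1 ∧ r + 1 < 2 * b) := by
      constructor
      · intro h1
        have l1 : 1 * b ≤ r + 1 := (Nat.le_div_iff_mul_le hb).mp (by omega)
        have l2 : r + 1 < 2 * b := (Nat.div_lt_iff_lt_mul hb).mp (by omega)
        omega
      · rintro ⟨h1, h2⟩
        have l1 : 1 ≤ (r + 1) / b := (Nat.le_div_iff_mul_le hb).mpr (by omega)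
        have l2 : (r + 1) / b < 2 := (Nat.div_lt_iff_lt_mul hb).mpr (by omega)
        omega
    simp only [posF, hdiv, hmod, hdiv', hmod', hdm]
    by_cases hc : b ≤ r + 1 ∧ r + 1 < 2 * b
    · rw [if_pos (hiff.mpr hc)]; omega
    · rw [if_neg (fun h => hc (hiff.mp h))]; omega
  · have e1 : N + 1 = b * 10 * (q + 1) := by rw [Nat.mul_add, Nat.mul_one]; omega
    have hdiv' : (N + 1) / (b * 10) = q + 1 := by
      rw [e1, Nat.mul_div_cancel_left _ (by omega : 0 < b * 10)]
    have hmod' : (N + 1) % (b * 10) = 0 := by rw [e1]; exact Nat.mul_mod_right _ _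
    have hdm : (N + 1) / b % 10 = 0 := by
      have e2 : N + 1 = b * (10 * (q + 1)) := by rw [e1]; ring
      rw [e2, Nat.mul_div_cancel_left _ hb, Nat.mul_mod_right]
    simp only [posF, hdiv, hmod, hdiv', hmod', hdm]
    rw [if_neg (by omega)]
    have hq1 : (q + 1) * b = q * b + b := by ring
    omega

theorem g_succ (N : Nat) (b : Nat) : g (N + 1) b = g N b + dc (N + 1) b := by
  by_cases hb : b = 0
  · subst hb; simp [g, dc]
  have hb' : 0 < b := by omega
  by_cases h1 : N + 1 < b
  · rw [g_zero _ _ h1, g_zero _ _ (by omega), dc_zero _ _ h1]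
  by_cases h2 : N + 1 = b
  · rw [g_zero N b (by omega)]
    rw [g, dif_neg hb, dif_neg (by omega)]
    rw [dc, dif_neg hb, dif_neg (by omega)]
    rw [g_zero _ _ (by omega : N + 1 < b * 10), dc_zero _ _ (by omega : N + 1 < b * 10)]
    have hd : (N + 1) / b = 1 := by rw [h2, Nat.div_self hb']
    have hp1 : (N + 1) / (b * 10) = 0 := Nat.div_eq_of_lt (by omega)
    have hp2 : (N + 1) % (b * 10) = N + 1 := Nat.mod_eq_of_lt (by omega)
    simp only [posF, hp1, hp2, hd]
    norm_num
    omega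
  · have hbN : b ≤ N := by omega
    rw [g, dif_neg hb, dif_neg (by omega)]
    rw [show g N b = posF N b + g N (b * 10) from by rw [g, dif_neg hb, dif_neg (by omega)]]
    rw [dc, dif_neg hb, dif_neg (by omega)]
    rw [posF_succ N b hb', g_succ N (b * 10)]
    split_ifs <;> omega
termination_by N + 2 - b
decreasing_by omega

theorem dc_eq_dcount (k b : Nat) (hb : 0 < b) : dc k b = dcount (k / b) := by
  by_cases h : k < b
  · rw [dc_zero _ _ h, Nat.div_eq_of_lt h, dcount]; simp
  · rw [dc, dif_neg (by omega), dif_neg h]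
    rw [dc_eq_dcount k (b * 10) (by omega)]
    have hkb : k / b ≠ 0 := by
      have : 1 * b ≤ k := by omega
      have := (Nat.le_div_iff_mul_le hb).mpr this
      omega
    conv_rhs => rw [dcount]
    rw [dif_neg hkb, Nat.div_div_eq_div_mul]
termination_by k + 1 - b
decreasing_by omega

theorem clamp_eval (N b : Nat) (hb : 0 < b) :
    min b (N % (b * 10) + 1 - b) =
      if 2 ≤ N / b % 10 then b else if N / b % 10 = 0 then 0 else N % b + 1 := by
  have hm : N % (b * 10) = N % b + b * (N / b % 10) := Nat.mod_mul
  have hlt : N % b < b := Nat.mod_lt _ hb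
  by_cases h2 : 2 ≤ N / b % 10
  · rw [if_pos h2]
    have hba : b * 2 ≤ b * (N / b % 10) := Nat.mul_le_mul_left b h2
    omega
  by_cases h0 : N / b % 10 = 0
  · rw [if_neg h2, if_pos h0]
    rw [h0, Nat.mul_zero] at hm
    omega
  · rw [if_neg h2, if_neg h0]
    have ha1 : N / b % 10 = 1 := by omega
    rw [ha1, Nat.mul_one] at hm
    omega

theorem g_one_eq_Cr (N : Nat) : g N 1 = Cr N := by
  induction N with
  | zero => exact g_zero 0 1 (by omega)
  | succ n ih =>
    rw [g_succ, ih, dc_eq_dcount _ _ (by omega), Nat.div_one, Cr]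

-- A's branch expression equals the positional closed form posF

-- A's loop computes the positional sums from position i upward
theorem aLoop_eq (N : Nat) : ∀ (fuel i : Nat) (c : Int), 1 ≤ i → N / 10 ^ (i - 1) < fuel →
    aLoop fuel (N : Int) ((N / 10 ^ (i - 1) : Nat) : Int) i c = c + ((g N (10 ^ (i - 1)) : Nat) : Int) := by
  intro fuel
  induction fuel with
  | zero => intro i c _ hf; exact absurd hf (Nat.not_lt_zero _)
  | succ fuel ihf =>
    intro i c hi hf
    have hb : 0 < 10 ^ (i - 1) := pow_pos (by omega) _
    by_cases ht : N / 10 ^ (i - 1) = 0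
    · have hNb : N < 10 ^ (i - 1) := by
        rcases Nat.div_eq_zero_iff.mp ht with h | h
        · omega
        · exact h
      rw [ht, g_zero _ _ hNb, aLoop]
      simp
    · have hbN : 10 ^ (i - 1) ≤ N := by
        by_contra hcon
        exact ht (Nat.div_eq_of_lt (by omega))
      have hsucc : 10 ^ (i - 1) * 10 = 10 ^ i := by
        rw [← pow_succ]; congr 1; omega
      rw [aLoop]
      rw [if_neg (by exact_mod_cast ht)]
      have em : PySem.Int.mod ((N / 10 ^ (i - 1) : Nat) : Int) 10 = ((N / 10 ^ (i - 1) % 10 : Nat) : Int) := by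
        exact_mod_cast PySem.Int.mod_natCast _ 10
      have ef : PySem.Int.floordiv ((N / 10 ^ (i - 1) : Nat) : Int) 10 = ((N / 10 ^ (i - 1) / 10 : Nat) : Int) := by
        exact_mod_cast PySem.Int.floordiv_natCast _ 10
      have em2 : PySem.Int.mod ((N : Nat) : Int) ((10 : Int) ^ i) = ((N % 10 ^ i : Nat) : Int) := by
        exact_mod_cast PySem.Int.mod_natCast N (10 ^ i)
      have ef2 : PySem.Int.floordiv ((N : Nat) : Int) ((10 : Int) ^ i) = ((N / 10 ^ i : Nat) : Int) := by
        exact_mod_cast PySem.Int.floordiv_natCast N (10 ^ i)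
      have hnext : N / 10 ^ (i - 1) / 10 = N / 10 ^ i := by
        rw [Nat.div_div_eq_div_mul, hsucc]
      simp only [em, ef, em2, ef2, hnext]
      have hIH : ∀ c' : Int, aLoop fuel (N : Int) ((N / 10 ^ i : Nat) : Int) (i + 1) c'
          = c' + ((g N (10 ^ i) : Nat) : Int) := by
        intro c'
        have hlt : N / 10 ^ (i + 1 - 1) < fuel := by
          simp only [Nat.add_sub_cancel]
          rw [← hnext]
          have := Nat.div_lt_self (Nat.pos_of_ne_zero ht) (by norm_num : 1 < 10)
          omega
        have := ihf (i + 1) c' (by omega) hlt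
        simpa using this
      rw [hIH]
      rw [show g N (10 ^ (i - 1)) = posF N (10 ^ (i - 1)) + g N (10 ^ (i - 1) * 10) from by
        rw [g, dif_neg (by omega), dif_neg (not_lt.mpr hbN)]]
      rw [hsucc]
      have hcl := clamp_eval N (10 ^ (i - 1)) hb
      have hmm : N % (10 ^ (i - 1) * 10) = N % 10 ^ (i - 1) + 10 ^ (i - 1) * (N / 10 ^ (i - 1) % 10) :=
        Nat.mod_mul
      have hmlt : N % 10 ^ (i - 1) < 10 ^ (i - 1) := Nat.mod_lt _ hb
      simp only [posF, hsucc] at hcl ⊢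
      by_cases h2 : 2 ≤ N / 10 ^ (i - 1) % 10
      · rw [if_pos (by exact_mod_cast (by omega : (1 : Nat) < N / 10 ^ (i - 1) % 10))]
        rw [hcl, if_pos h2]
        push_cast
        ring
      · rw [if_neg (by
          intro hcon
          exact h2 (by
            have : (1 : Nat) < N / 10 ^ (i - 1) % 10 := by exact_mod_cast hcon
            omega))]
        by_cases h0 : N / 10 ^ (i - 1) % 10 = 0
        · rw [if_pos (by rw [h0]; norm_num)]
          rw [hcl, if_neg h2, if_pos h0]
          push_cast
          ring
        · have ha1 : N / 10 ^ (i - 1) % 10 = 1 := by omega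
          rw [ha1, Nat.mul_one] at hmm
          rw [hsucc] at hmm
          rw [ha1] at hcl ⊢
          norm_num at hcl
          rw [hcl]
          push_cast [hmm]
          ring
theorem A_eq_Cr (N : Nat) : NumberOf1Between1AndN_Solution (N : Int) = (Cr N : Int) := by
  have h := aLoop_eq N (N + 1) 1 0 (by omega) (by norm_num)
  norm_num at h
  rw [NumberOf1Between1AndN_Solution]
  rw [show ((N : Int).natAbs + 1) = N + 1 by simp]
  rw [h, g_one_eq_Cr]

-- digits of c*10^e + j (j < 10^e) are the digits of c and of j



theorem dcount_unfold (j : Nat) : dcount j = (if j % 10 = 1 then 1 else 0) + dcount (j / 10) := by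
  by_cases h : j = 0
  · subst h; simp [dcount]
  · rw [dcount, dif_neg h]

theorem dcount_zero : dcount 0 = 0 := by simp [dcount]

theorem dcount_small (m : Nat) (hm : m ≤ 9) : dcount m = if m = 1 then 1 else 0 := by
  rw [dcount_unfold, Nat.mod_eq_of_lt (by omega), Nat.div_eq_of_lt (by omega), dcount_zero]
  simp

theorem Cr_succ (n : Nat) : Cr (n + 1) = Cr n + dcount (n + 1) := rfl

theorem Cr_small (m : Nat) : m ≤ 9 → Cr m = min m 1 := by
  induction m with
  | zero => intro _; simp [Cr]
  | succ m ih =>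
    intro hm
    rw [Cr_succ, ih (by omega), dcount_small (m + 1) (by omega)]
    split_ifs <;> omega

theorem dcount_mul_pow (e : Nat) : ∀ c : Nat, dcount (c * 10 ^ e) = dcount c := by
  induction e with
  | zero => intro c; norm_num
  | succ e ih =>
    intro c
    have e1 : c * 10 ^ (e + 1) = 10 * (c * 10 ^ e) + 0 := by ring
    rw [e1, dcount_unfold, Nat.mul_add_mod, Nat.mul_add_div (by omega)]
    norm_num
    exact ih c

-- digits of c*10^e + j (j < 10^e) are the digits of c and of j
theorem dcount_split (e : Nat) : ∀ c j : Nat, j < 10 ^ e → dcount (c * 10 ^ e + j) = dcount c + dcount j := by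
  induction e with
  | zero =>
    intro c j hj
    have hj0 : j = 0 := by omega
    subst hj0
    simp [dcount_zero]
  | succ e ih =>
    intro c j hj
    by_cases hc : c = 0
    · subst hc; simp [dcount_zero]
    · have e1 : c * 10 ^ (e + 1) + j = 10 * (c * 10 ^ e) + j := by ring
      have hdiv : (c * 10 ^ (e + 1) + j) / 10 = c * 10 ^ e + j / 10 := by
        rw [e1, Nat.mul_add_div (by omega)]
      have hmod : (c * 10 ^ (e + 1) + j) % 10 = j % 10 := by
        rw [e1, Nat.mul_add_mod]
      have hjlt : j / 10 < 10 ^ e := by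
        have hp : 10 ^ (e + 1) = 10 ^ e * 10 := pow_succ 10 e
        exact (Nat.div_lt_iff_lt_mul (by omega)).mpr (by omega)
      rw [dcount_unfold (c * 10 ^ (e + 1) + j), hdiv, hmod, ih c (j / 10) hjlt,
        dcount_unfold j]
      ring

theorem block (e : Nat) : ∀ h : Nat, h ≤ 9 → ∀ j : Nat, j < 10 ^ e →
    Cr (h * 10 ^ e + j) =
      h * Cr (10 ^ e - 1) + (if 2 ≤ h then 10 ^ e else 0) + (if h = 1 then j + 1 else 0) + Cr j := by
  intro h
  induction h with
  | zero => intro _ j hj; norm_num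
  | succ h ihh =>
    intro hh9 j
    have hp : 0 < 10 ^ e := pow_pos (by omega) e
    have hdc : dcount (h + 1) = if h + 1 = 1 then 1 else 0 := dcount_small _ (by omega)
    induction j with
    | zero =>
      intro _
      have hsplit : (h + 1) * 10 ^ e = (h * 10 ^ e + (10 ^ e - 1)) + 1 := by
        have e1 : (h + 1) * 10 ^ e = h * 10 ^ e + 10 ^ e := by ring
        omega
      rw [Nat.add_zero, hsplit, Cr_succ]
      rw [ihh (by omega) (10 ^ e - 1) (by omega)]
      rw [← hsplit, dcount_mul_pow e (h + 1), hdc]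
      have e1 : (h + 1) * Cr (10 ^ e - 1) = h * Cr (10 ^ e - 1) + Cr (10 ^ e - 1) := by ring
      have hCr0 : Cr 0 = 0 := rfl
      rw [hCr0]
      split_ifs <;> omega
    | succ j ihj =>
      intro hj
      have hj' : j < 10 ^ e := by omega
      have hstep : (h + 1) * 10 ^ e + (j + 1) = ((h + 1) * 10 ^ e + j) + 1 := by omega
      rw [hstep, Cr_succ, ihj hj', ← hstep]
      rw [dcount_split e (h + 1) (j + 1) (by omega), hdc]
      rw [show Cr (j + 1) = Cr j + dcount (j + 1) from rfl]
      split_ifs <;> omega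

theorem powLoop_spec (m : Int) : ∀ (fuel : Nat) (p : Int), 0 < p → p ≤ m → (m - p).toNat < fuel →
    powLoop fuel m p ≤ m ∧ m < 10 * powLoop fuel m p ∧ ∃ e : Nat, powLoop fuel m p = p * 10 ^ e := by
  intro fuel
  induction fuel with
  | zero => intro p _ _ h; omega
  | succ fuel ih =>
    intro p hp hpm hf
    rw [powLoop]
    by_cases h : p * 10 ≤ m
    · rw [if_pos h]
      obtain ⟨h1, h2, e, h3⟩ := ih (p * 10) (by omega) (by omega) (by omega)
      exact ⟨h1, h2, e + 1, by rw [h3]; ring⟩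
    · rw [if_neg h]
      exact ⟨hpm, by omega, 0, by ring⟩

theorem altOnes_eq : ∀ (fuel N : Nat), N < fuel → altOnes fuel (N : Int) = ((Cr N : Nat) : Int) := by
  intro fuel
  induction fuel with
  | zero => intro N h; omega
  | succ fuel IH =>
    intro N hNf
    by_cases h0 : N = 0
    · subst h0
      rw [altOnes]
      norm_num [Cr]
    by_cases h10 : N < 10
    · rw [altOnes]
      rw [if_neg (by omega), if_pos (by exact_mod_cast h10)]
      rw [Cr_small N (by omega)]
      have : min N 1 = 1 := by omega
      rw [this]
      norm_num
    · rw [altOnes]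
      rw [if_neg (by omega), if_neg (by
        intro hcon
        exact h10 (by exact_mod_cast hcon))]
      have htn : ((N : Int)).toNat = N := Int.toNat_natCast N
      rw [htn]
      obtain ⟨hle, hlt, e', hpw⟩ := powLoop_spec (N : Int) N 1 (by norm_num)
        (by exact_mod_cast (by omega : (1 : Nat) ≤ N)) (by omega)
      rw [one_mul] at hpw
      have hpcast : powLoop N (N : Int) 1 = ((10 ^ e' : Nat) : Int) := by
        rw [hpw]; push_cast; ring
      have hleN : 10 ^ e' ≤ N := by
        rw [hpcast] at hle; exact_mod_cast hle
      have hltN : N < 10 * 10 ^ e' := by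
        rw [hpcast] at hlt; exact_mod_cast hlt
      have hef : PySem.Int.floordiv (N : Int) ((10 ^ e' : Nat) : Int) = ((N / 10 ^ e' : Nat) : Int) := by
        exact_mod_cast PySem.Int.floordiv_natCast N (10 ^ e')
      have hem : PySem.Int.mod (N : Int) ((10 ^ e' : Nat) : Int) = ((N % 10 ^ e' : Nat) : Int) := by
        exact_mod_cast PySem.Int.mod_natCast N (10 ^ e')
      simp only [hpcast, hef, hem]
      have hpp : 0 < 10 ^ e' := pow_pos (by omega) _
      have hd9 : N / 10 ^ e' ≤ 9 := by
        have := (Nat.div_lt_iff_lt_mul hpp).mpr (by omega : N < 10 * 10 ^ e')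
        omega
      have hd1 : 1 ≤ N / 10 ^ e' := (Nat.le_div_iff_mul_le hpp).mpr (by omega)
      have hr : N % 10 ^ e' < 10 ^ e' := Nat.mod_lt _ hpp
      have hc1 : ((10 ^ e' : Nat) : Int) - 1 = ((10 ^ e' - 1 : Nat) : Int) := by
        rw [Nat.cast_sub (by omega : 1 ≤ 10 ^ e')]
        norm_num
      rw [hc1, IH (10 ^ e' - 1) (by omega), IH (N % 10 ^ e') (by omega)]
      have hblock := block e' (N / 10 ^ e') hd9 (N % 10 ^ e') hr
      rw [Nat.div_add_mod' N (10 ^ e')] at hblock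
      rw [hblock]
      by_cases hd : N / 10 ^ e' = 1
      · rw [if_pos (by exact_mod_cast hd)]
        rw [hd]
        norm_num
        ring
      · rw [if_neg (by
          intro hcon
          exact hd (by exact_mod_cast hcon))]
        have hd2 : 2 ≤ N / 10 ^ e' := by omega
        rw [if_pos hd2, if_neg hd]
        push_cast
        ring

-- ===== VERDICT (by name: the statement is the Claim_ definition above) =====
theorem NumberOf1Between1AndN_Solution_spec : Claim_equal_NumberOf1Between1AndN_Solution := by
  intro n _ hpre
  have hn : n = ((n.toNat : Nat) : Int) := by
    exact (Int.toNat_of_nonneg hpre).symm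
  unfold Spec_NumberOf1Between1AndN_Solution NumberOf1Between1AndN_Solution_alt
  rw [hn, A_eq_Cr, Int.toNat_natCast]
  rw [altOnes_eq (n.toNat + 1) n.toNat (by omega)]
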